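-- pv_equiv track=rewrite | github.com/Dong-Uri/Algorithm | 프로그래머스/4/17685. ［3차］ 자동완성/［3차］ 자동완성.py | solution
-- ===== SOURCE A (Python) =====
-- def solution(words):
--     answer = 0
--     i = 0
--     while words:
--         word_dict = {}
--         for word in words:
--             key = word[:i + 1]
--             if key in word_dict.keys():
--                 word_dict[key].append(word)
--             else:
--                 word_dict[key] = [word]
--         words = []
--         for key, value in word_dict.items():
--             if len(value) == 1:
--                 answer += len(key)
--                 continue
--             for v in value:
--                 if v == key:
--                     answer += len(key)
--                     continue
--                 words.append(v)
--         i += 1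
--
--     return answer
-- ===== SOURCE B (Python) =====
-- def solution(words):
--     # Count, for every non-empty prefix p of every word, how many words start with p.
--     cnt = {}
--     for w in words:
--         for L in range(1, len(w) + 1):
--             p = w[:L]
--             cnt[p] = cnt.get(p, 0) + 1
--     # A word needs keystrokes up to its first uniquely-owned prefix (or all of it).
--     total = 0
--     for w in words:
--         keys = len(w)
--         for L in range(1, len(w) + 1):
--             if cnt[w[:L]] == 1:
--                 keys = L
--                 break
--         total += keys
--     return total
-- ===== Notes on version B (the rewrite author's own statement) =====
-- stated objective: alternative
-- what changed: A repeatedly regroups the shrinking word list into per-prefix-length dict buckets inside a while loop; B builds one global counter of all word prefixes in a single pass and then, independently per word, scans for the first uniquely-owned prefix.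
import Mathlib
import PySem

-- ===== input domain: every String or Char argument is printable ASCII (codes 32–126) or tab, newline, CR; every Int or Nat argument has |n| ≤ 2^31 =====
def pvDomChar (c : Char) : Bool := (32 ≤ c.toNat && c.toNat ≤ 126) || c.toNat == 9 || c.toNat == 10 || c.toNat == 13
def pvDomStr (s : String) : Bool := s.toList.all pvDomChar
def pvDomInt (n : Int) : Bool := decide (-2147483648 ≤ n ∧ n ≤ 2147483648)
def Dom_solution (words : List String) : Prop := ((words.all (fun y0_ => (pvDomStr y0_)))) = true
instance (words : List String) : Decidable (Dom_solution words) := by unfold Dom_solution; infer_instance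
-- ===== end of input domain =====

-- B replaces A's level-by-level regrouping of the word list with one global counter of all
-- word prefixes followed by an independent per-word scan (objective: alternative/simpler).

-- ===== PORT A =====
-- Strings are handled as their character lists (bijective; Python len/slicing/== agree).
-- key = word[:i + 1]  (i ≥ 0 throughout the loop, kept as a Nat)
def aKey (i : Nat) (word : List Char) : List Char :=
  PySem.List.slice word none (some ((i : Int) + 1))

-- word_dict = {}; for word in words: if key in word_dict.keys(): append else singleton
def aGroup (i : Nat) (ws : List (List Char)) : PySem.Dict (List Char) (List (List Char)) :=
  ws.foldl (fun d word =>
    if d.contains (aKey i word) then d.insert (aKey i word) (d.getD (aKey i word) [] ++ [word])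
    else d.insert (aKey i word) [word]) PySem.Dict.empty

-- for v in value: if v == key: answer += len(key); continue; words.append(v)
def aInner (key : List Char) (acc : Int × List (List Char)) (value : List (List Char)) :
    Int × List (List Char) :=
  value.foldl (fun acc2 v =>
    if v = key then (acc2.1 + (key.length : Int), acc2.2)
    else (acc2.1, acc2.2 ++ [v])) acc

-- for key, value in word_dict.items(): …   (starting from words = [])
def aPass (items : List (List Char × List (List Char))) (answer : Int) :
    Int × List (List Char) :=
  items.foldl (fun acc kv =>
    if kv.2.length = 1 then (acc.1 + (kv.1.length : Int), acc.2)
    else aInner kv.1 acc kv.2) (answer, [])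

def aFuel (ws : List (List Char)) : Nat := (ws.map (fun w => w.length + 1)).sum

-- while words: …   (fuel is a totality guard only: aFuel bounds the number of iterations,
-- since every surviving word is longer than the current prefix length)
def solLoop : Nat → List (List Char) → Nat → Int → Int
  | _, [], _, answer => answer
  | 0, _ :: _, _, answer => answer
  | fuel + 1, ws, i, answer =>
      let r := aPass (aGroup i ws).items answer
      solLoop fuel r.2 (i + 1) r.1

def solution (words : List String) : Int :=
  solLoop (aFuel (words.map String.toList)) (words.map String.toList) 0 0

-- ===== PORT B =====
-- cnt = {}; for w in words: for L in range(1, len(w)+1): p = w[:L]; cnt[p] = cnt.get(p, 0) + 1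
def bCnt (ws : List (List Char)) : PySem.Dict (List Char) Int :=
  ws.foldl (fun d w =>
    (PySem.List.pyRange 1 ((w.length : Int) + 1)).foldl (fun d L =>
      d.insert (PySem.List.slice w none (some L))
        (d.getD (PySem.List.slice w none (some L)) 0 + 1)) d) PySem.Dict.empty

-- keys = len(w); for L in range(1, len(w)+1): if cnt[w[:L]] == 1: keys = L; break
-- (w[:L] was inserted while building cnt whenever 1 ≤ L ≤ len(w), so getD _ 0 is Python's cnt[p])
def bScan (cnt : PySem.Dict (List Char) Int) (w : List Char) (L : Nat) : Nat :=
  if L ≤ w.length then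
    if cnt.getD (PySem.List.slice w none (some (L : Int))) 0 = 1 then L
    else bScan cnt w (L + 1)
  else w.length
termination_by w.length + 1 - L

def solution_alt (words : List String) : Int :=
  let ws := words.map String.toList
  let cnt := bCnt ws
  ws.foldl (fun total w => total + (bScan cnt w 1 : Int)) 0

-- ===== PRECONDITION & SPEC =====
def Spec_solution (words : List String) (out : Int) : Prop := out = solution_alt words
instance (words : List String) (out : Int) : Decidable (Spec_solution words out) := by unfold Spec_solution; infer_instance

-- ===== CLAIM (what is proved, stated in full; the proofs are below) =====
def Claim_equal_solution : Prop := ∀ (words : List String), Dom_solution words → Spec_solution words (solution words)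

-- ===== LEMMAS AND PROOFS =====

-- the number of keystrokes A eventually charges word w, scanning prefix lengths from s upward
def pvCnt (ws : List (List Char)) (n : Nat) (w : List Char) : Nat :=
  ws.countP (fun x => x.take n == w.take n)

def pvF (ws : List (List Char)) (w : List Char) (s : Nat) : Nat :=
  if w.length ≤ s then w.length
  else if pvCnt ws s w = 1 then s
  else pvF ws w (s + 1)
termination_by w.length - s

def pvGrp (n : Nat) (ws : List (List Char)) (k : List Char) : List (List Char) :=
  ws.filter (fun w => w.take n == k)

def pvSurv (ws : List (List Char)) (n : Nat) (w : List Char) : Bool :=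
  decide (n < w.length) && decide (2 ≤ pvCnt ws n w)

def pvAdd (k : List Char) (g : List (List Char)) : Nat :=
  if g.length = 1 then k.length else (g.filter (fun v => v == k)).length * k.length

def pvSg (k : List Char) (g : List (List Char)) : List (List Char) :=
  if g.length = 1 then [] else g.filter (fun v => ¬ (v == k))

def pvMu (ws : List (List Char)) (i : Nat) : Nat := (ws.map (fun w => w.length + 1 - i)).sum

lemma aKey_take (i : Nat) (w : List Char) : aKey i w = w.take (i + 1) := by
  have : ((i : Int) + 1) = ((i + 1 : Nat) : Int) := by push_cast; ring
  rw [aKey, this, PySem.List.slice_to_natCast]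

lemma aGroup_eq_modify (i : Nat) (ws : List (List Char)) :
    aGroup i ws = (ws.map (fun w => (aKey i w, w))).foldl
      (fun d p => d.modify p.1 [] (· ++ [p.2])) PySem.Dict.empty := by
  rw [aGroup, List.foldl_map]
  congr 1
  funext d w
  by_cases h : d.contains (aKey i w)
  · simp only [h, if_true]
    rfl
  · simp only [Bool.not_eq_true] at h
    simp only [h, Bool.false_eq_true, if_false]
    have := PySem.Dict.getD_of_not_contains d ([] : List (List Char)) h
    calc d.insert (aKey i w) [w]
        = d.insert (aKey i w) (d.getD (aKey i w) [] ++ [w]) := by rw [this]; rfl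
      _ = d.modify (aKey i w) [] (· ++ [w]) := rfl

lemma group_getD (i : Nat) (ws : List (List Char)) (k : List Char) :
    (aGroup i ws).getD k [] = pvGrp (i + 1) ws k := by
  rw [aGroup_eq_modify, PySem.Dict.getD_foldl_modify_append]
  simp only [PySem.Dict.getD_empty, List.nil_append, List.filter_map, List.map_map]
  simp only [pvGrp, Function.comp_def, aKey_take, List.map_id_fun']
  simp

lemma group_keys (i : Nat) (ws : List (List Char)) :
    (aGroup i ws).keys = PySem.Set.ofList (ws.map (fun w => w.take (i + 1))) := by
  rw [aGroup_eq_modify]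
  rw [show (fun (d : PySem.Dict (List Char) (List (List Char))) (p : List Char × List Char) =>
        d.modify p.1 [] (· ++ [p.2])) = fun d p => d.modify ((fun q => q.1) p) []
        ((fun (d : PySem.Dict (List Char) (List (List Char))) (q : List Char × List Char)
          (v : List (List Char)) => v ++ [q.2]) d p) from rfl]
  rw [PySem.Dict.keys_foldl_modify_key]
  rw [PySem.Dict.keys_empty, PySem.Set.update_nil_left, List.map_map]
  congr 1
  apply List.map_congr_left
  intro x _
  simp [aKey_take]

lemma group_keys_nodup (i : Nat) (ws : List (List Char)) : (aGroup i ws).keys.Nodup := by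
  rw [aGroup_eq_modify]
  rw [show (fun (d : PySem.Dict (List Char) (List (List Char))) (p : List Char × List Char) =>
        d.modify p.1 [] (· ++ [p.2])) = fun d p => d.modify ((fun q => q.1) p) []
        ((fun (d : PySem.Dict (List Char) (List (List Char))) (q : List Char × List Char)
          (v : List (List Char)) => v ++ [q.2]) d p) from rfl]
  exact PySem.Dict.nodup_keys_foldl_modify_key _ _ _ _ _ (by simp [PySem.Dict.keys_empty])

lemma group_items (i : Nat) (ws : List (List Char)) :
    (aGroup i ws).items =
      (PySem.Set.ofList (ws.map (fun w => w.take (i + 1)))).map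
        (fun k => (k, pvGrp (i + 1) ws k)) := by
  rw [PySem.Dict.items_eq_map_keys _ (group_keys_nodup i ws) [], group_keys]
  apply List.map_congr_left
  intro k _
  rw [group_getD]

lemma countP_range_single (n j0 : Nat) (q : Nat → Bool)
    (h : ∀ k, k < n → (q k = true ↔ k = j0)) :
    (List.range n).countP q = if j0 < n then 1 else 0 := by
  induction n with
  | zero => simp
  | succ m ih =>
      rw [List.range_succ, List.countP_append]
      rw [ih (fun k hk => h k (Nat.lt_succ_of_lt hk))]
      by_cases hj2 : j0 = m
      · have hq : q m = true := by rw [h m (Nat.lt_succ_self m)]; omega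
        simp [hq, hj2]
      · have hq : ¬ q m = true := by rw [h m (Nat.lt_succ_self m)]; omega
        by_cases hj : j0 < m
        · simp [hq, hj, Nat.lt_succ_of_lt hj]
        · simp [hq, show ¬ j0 < m from hj, show ¬ j0 < m + 1 by omega]

lemma count_prefList (w p : List Char) :
    ((List.range w.length).map (fun k => w.take (k + 1))).count p =
      if 1 ≤ p.length ∧ w.take p.length = p then 1 else 0 := by
  have hc : ((List.range w.length).map (fun k => w.take (k + 1))).count p =
      (List.range w.length).countP (fun k => w.take (k + 1) == p) := by
    rw [show ((List.range w.length).map (fun k => w.take (k + 1))).count p =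
      ((List.range w.length).map (fun k => w.take (k + 1))).countP (· == p) from rfl,
      List.countP_map]
    rfl
  rw [hc]
  by_cases hcond : 1 ≤ p.length ∧ w.take p.length = p
  · obtain ⟨h1, h2⟩ := hcond
    have hple : p.length ≤ w.length := by
      have := congrArg List.length h2
      simp [List.length_take] at this
      omega
    rw [countP_range_single w.length (p.length - 1) _ ?_]
    · simp only [if_pos (by omega : p.length - 1 < w.length)]
      simp [h1, h2]
    · intro k hk
      constructor
      · intro hq
        have hq' : w.take (k + 1) = p := by simpa using hq
        have hlen : p.length = k + 1 := by rw [← hq', List.length_take]; omega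
        omega
      · intro hk2
        have : k + 1 = p.length := by omega
        rw [this, h2]
        simp
  · rw [if_neg hcond, List.countP_eq_zero]
    intro k hk hq
    simp only [List.mem_range] at hk
    have hq' : w.take (k + 1) = p := by simpa using hq
    have hlen : p.length = k + 1 := by rw [← hq', List.length_take]; omega
    exact hcond ⟨by omega, by rw [hlen, hq']⟩

lemma bCnt_inner (w : List Char) (d : PySem.Dict (List Char) Int) (p : List Char) :
    ((PySem.List.pyRange 1 ((w.length : Int) + 1)).foldl (fun d L =>
      d.insert (PySem.List.slice w none (some L))
        (d.getD (PySem.List.slice w none (some L)) 0 + 1)) d).getD p 0 =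
      d.getD p 0 + (if 1 ≤ p.length ∧ w.take p.length = p then 1 else 0) := by
  rw [PySem.List.pyRange_one]
  have he : ((w.length : Int) + 1 - 1).toNat = w.length := by omega
  rw [he, List.foldl_map]
  have hstep : (fun (d : PySem.Dict (List Char) Int) (k : Nat) =>
      d.insert (PySem.List.slice w none (some ((1 : Int) + (k : Nat))))
        (d.getD (PySem.List.slice w none (some ((1 : Int) + (k : Nat)))) 0 + 1)) =
      fun d k => d.insert (w.take (k + 1)) (d.getD (w.take (k + 1)) 0 + 1) := by
    funext d k
    have : ((1 : Int) + (k : Nat)) = (((k + 1 : Nat)) : Int) := by push_cast; ring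
    rw [this, PySem.List.slice_to_natCast]
  rw [hstep]
  rw [show List.foldl (fun (d : PySem.Dict (List Char) Int) (k : Nat) =>
        d.insert (w.take (k + 1)) (d.getD (w.take (k + 1)) 0 + 1)) d (List.range w.length) =
      List.foldl (fun d x => d.insert x (d.getD x 0 + 1)) d
        ((List.range w.length).map (fun k => w.take (k + 1))) from by rw [List.foldl_map]]
  rw [PySem.Dict.getD_foldl_insert_add_one, count_prefList]
  split <;> simp

lemma bCnt_getD (ws : List (List Char)) (p : List Char) (hp : 1 ≤ p.length) :
    (bCnt ws).getD p 0 = ((ws.countP (fun x => x.take p.length == p) : Nat) : Int) := by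
  suffices h : ∀ d : PySem.Dict (List Char) Int,
      (ws.foldl (fun d w =>
        (PySem.List.pyRange 1 ((w.length : Int) + 1)).foldl (fun d L =>
          d.insert (PySem.List.slice w none (some L))
            (d.getD (PySem.List.slice w none (some L)) 0 + 1)) d) d).getD p 0 =
      d.getD p 0 + ((ws.countP (fun x => x.take p.length == p) : Nat) : Int) by
    have := h PySem.Dict.empty
    rw [bCnt, this]
    simp [PySem.Dict.getD_empty]
  induction ws with
  | nil => intro d; simp
  | cons w t ih =>
      intro d
      rw [List.foldl_cons, ih, bCnt_inner, List.countP_cons]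
      by_cases hc : w.take p.length = p
      · simp [hc, hp]
        ring
      · have : ¬ (1 ≤ p.length ∧ w.take p.length = p) := by tauto
        simp only [this, if_false]
        have hb : (w.take p.length == p) = false := by simpa using hc
        simp [hb]

lemma bScan_eq_pvF (ws : List (List Char)) (w : List Char) (L : Nat) (hL : 1 ≤ L) :
    bScan (bCnt ws) w L = pvF ws w L := by
  generalize hm : w.length + 1 - L = m
  induction m generalizing L with
  | zero =>
      rw [bScan, pvF]
      have h1 : ¬ L ≤ w.length := by omega
      have h2 : w.length ≤ L := by omega
      simp [h1, h2]
  | succ m ih =>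
      rw [bScan, pvF]
      by_cases h1 : L ≤ w.length
      · have hgd : (bCnt ws).getD (PySem.List.slice w none (some (L : Int))) 0 =
            ((pvCnt ws L w : Nat) : Int) := by
          rw [PySem.List.slice_to_natCast]
          have hlp : (w.take L).length = L := by rw [List.length_take]; omega
          rw [bCnt_getD ws (w.take L) (by omega), hlp]
          rfl
        rw [hgd]
        by_cases hone : pvCnt ws L w = 1
        · have : ((pvCnt ws L w : Nat) : Int) = 1 := by rw [hone]; rfl
          by_cases hw : w.length ≤ L
          · simp [h1, hone]; omega
          · simp [h1, hw, hone]
        · have hne : ¬ ((pvCnt ws L w : Nat) : Int) = 1 := by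
            intro hc; apply hone; exact_mod_cast hc
          by_cases hw : w.length ≤ L
          · -- L = w.length; bScan recurses to L+1 then returns w.length
            have hLl : L = w.length := by omega
            simp only [h1, if_true, hne, if_false, hw]
            rw [bScan]
            have : ¬ L + 1 ≤ w.length := by omega
            simp [this]
          · simp only [h1, if_true, hne, if_false, hw, hone]
            exact ih (L + 1) (by omega) (by omega)
      · have hw : w.length ≤ L := by omega
        simp [h1, hw]

lemma foldl_add_cast (cnt : PySem.Dict (List Char) Int) (ws : List (List Char)) :
    ∀ (a : Int), ws.foldl (fun total w => total + (bScan cnt w 1 : Int)) a =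
      a + ((ws.map (fun w => bScan cnt w 1)).sum : Nat) := by
  induction ws with
  | nil => intro a; simp
  | cons w t ih =>
      intro a
      rw [List.foldl_cons, ih, List.map_cons, List.sum_cons]
      push_cast
      ring

lemma alt_eq_sum (words : List String) :
    solution_alt words =
      (((words.map String.toList).map (fun w => pvF (words.map String.toList) w 1)).sum : Int) := by
  show (words.map String.toList).foldl _ 0 = _
  rw [foldl_add_cast]
  rw [show (words.map String.toList).map (fun w => bScan (bCnt (words.map String.toList)) w 1) =
      (words.map String.toList).map (fun w => pvF (words.map String.toList) w 1) from
    List.map_congr_left (fun w _ => bScan_eq_pvF _ w 1 (by omega))]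
  simp

lemma aInner_spec (k : List Char) (g : List (List Char)) : ∀ (a : Int) (l : List (List Char)),
    aInner k (a, l) g =
      (a + (((g.filter (fun v => v == k)).length * k.length : Nat) : Int),
       l ++ g.filter (fun v => ¬ (v == k))) := by
  induction g with
  | nil => intro a l; simp [aInner]
  | cons v t ih =>
      intro a l
      rw [aInner, List.foldl_cons]
      by_cases hv : v = k
      · have hb : (v == k) = true := by simpa using hv
        simp only [hv, if_true]
        rw [show List.foldl _ (a + (k.length : Int), l) t = aInner k (a + (k.length : Int), l) t from rfl, ih]
        simp
        ring
      · have hb : (v == k) = false := by simpa using hv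
        simp only [hv, if_false]
        rw [show List.foldl _ (a, l ++ [v]) t = aInner k (a, l ++ [v]) t from rfl, ih]
        simp [List.filter_cons, hb, List.append_assoc]
        exact hv

lemma aPass_aux (items : List (List Char × List (List Char))) : ∀ (a : Int) (l : List (List Char)),
    items.foldl (fun acc kv =>
      if kv.2.length = 1 then (acc.1 + (kv.1.length : Int), acc.2)
      else aInner kv.1 acc kv.2) (a, l) =
      (a + (((items.map (fun kv => pvAdd kv.1 kv.2)).sum : Nat) : Int),
       l ++ items.flatMap (fun kv => pvSg kv.1 kv.2)) := by
  induction items with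
  | nil => intro a l; simp
  | cons kv t ih =>
      intro a l
      rw [List.foldl_cons]
      by_cases h1 : kv.2.length = 1
      · simp only [h1, if_true]
        rw [ih]
        simp [pvAdd, pvSg, h1]
        ring
      · simp only [h1, if_false]
        rw [show aInner kv.1 (a, l) kv.2 = _ from aInner_spec kv.1 kv.2 a l, ih]
        simp [pvAdd, pvSg, h1, List.append_assoc]
        ring

lemma aPass_spec (items : List (List Char × List (List Char))) (ans : Int) :
    aPass items ans =
      (ans + ((items.map (fun kv => pvAdd kv.1 kv.2)).sum : Int),
       items.flatMap (fun kv => pvSg kv.1 kv.2)) := by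
  rw [aPass, aPass_aux]
  simp

lemma cnt_of_mem_grp (n : Nat) (ws : List (List Char)) (k : List Char) (v : List Char)
    (hv : v ∈ pvGrp n ws k) : pvCnt ws n v = (pvGrp n ws k).length := by
  have hk : v.take n = k := by
    have := (List.mem_filter.mp hv).2
    simpa using this
  simp [pvCnt, pvGrp, hk, List.countP_eq_length_filter]

-- a word equal to its own key is short; one different from it is long
lemma take_eq_iff_short (n : Nat) (v k : List Char) (h : v.take n = k) :
    (v = k ↔ v.length ≤ n) := by
  constructor
  · intro hv; rw [← hv] at h; exact (List.take_eq_self_iff v).mp h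
  · intro hl; rw [← h, (List.take_eq_self_iff v).mpr hl]

lemma pvF_of_singleton (n : Nat) (ws : List (List Char)) (v : List Char)
    (hc : pvCnt ws n v = 1) : pvF ws v n = (v.take n).length := by
  rw [pvF]
  by_cases hl : v.length ≤ n
  · rw [if_pos hl, List.take_eq_self_iff v |>.mpr hl]
  · rw [if_neg hl, if_pos hc, List.length_take]
    omega

lemma perKey_aux (n : Nat) (ws : List (List Char)) (k : List Char) (l : List (List Char))
    (hmem : ∀ v ∈ l, v.take n = k ∧ pvCnt ws n v ≠ 1) :
    (l.map (fun v => pvF ws v n)).sum =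
      (l.filter (fun v => v == k)).length * k.length +
        ((l.filter (fun v => ¬ (v == k))).map (fun v => pvF ws v (n + 1))).sum := by
  induction l with
  | nil => simp
  | cons v t ih =>
      obtain ⟨hk, hc⟩ := hmem v (List.mem_cons_self ..)
      have iht := ih (fun x hx => hmem x (List.mem_cons_of_mem _ hx))
      rw [List.map_cons, List.sum_cons, iht]
      by_cases hv : v = k
      · have hb : (v == k) = true := by simpa using hv
        have hshort : v.length ≤ n := (take_eq_iff_short n v k hk).mp hv
        have : pvF ws v n = v.length := by rw [pvF, if_pos hshort]
        rw [this]
        simp [hv, Nat.succ_mul]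
        omega
      · have hb : (v == k) = false := by simpa using hv
        have hlong : ¬ v.length ≤ n := fun hl => hv ((take_eq_iff_short n v k hk).mpr hl)
        have : pvF ws v n = pvF ws v (n + 1) := by rw [pvF, if_neg hlong, if_neg hc]
        rw [this]
        simp [hv]
        omega

lemma perKey (n : Nat) (ws : List (List Char)) (k : List Char)
    (_hg : pvGrp n ws k ≠ []) :
    ((pvGrp n ws k).map (fun v => pvF ws v n)).sum =
      pvAdd k (pvGrp n ws k) + ((pvSg k (pvGrp n ws k)).map (fun v => pvF ws v (n + 1))).sum := by
  have hmem : ∀ v ∈ pvGrp n ws k, v.take n = k ∧ pvCnt ws n v = (pvGrp n ws k).length := by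
    intro v hv
    refine ⟨?_, cnt_of_mem_grp n ws k v hv⟩
    have := (List.mem_filter.mp hv).2
    simpa using this
  by_cases h1 : (pvGrp n ws k).length = 1
  · obtain ⟨v, hveq⟩ := List.length_eq_one_iff.mp h1
    obtain ⟨hk, hc⟩ := hmem v (by rw [hveq]; exact List.mem_cons_self ..)
    rw [pvAdd, pvSg, if_pos h1, if_pos h1, hveq]
    rw [← hk]
    simp [pvF_of_singleton n ws v (by rw [hc, h1])]
  · rw [pvAdd, pvSg, if_neg h1, if_neg h1]
    exact perKey_aux n ws k _ (fun v hv => ⟨(hmem v hv).1, by rw [(hmem v hv).2]; exact h1⟩)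

lemma count_filter_ite (a : List Char) (p : List Char → Bool) (l : List (List Char)) :
    (l.filter p).count a = if p a then l.count a else 0 := by
  by_cases hp : p a
  · rw [if_pos hp, List.count_filter hp]
  · rw [if_neg hp, List.count_eq_zero]
    intro hmem
    exact hp (List.mem_filter.mp hmem).2

lemma sum_ite_mem (k0 : List Char) (c : Nat) (K : List (List Char)) (hnd : K.Nodup) :
    (K.map (fun k => if k0 = k then c else 0)).sum = if k0 ∈ K then c else 0 := by
  induction K with
  | nil => simp
  | cons k t ih =>
      rw [List.map_cons, List.sum_cons, ih (List.nodup_cons.mp hnd).2]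
      by_cases h : k0 = k
      · subst h
        have hnotin : k0 ∉ t := (List.nodup_cons.mp hnd).1
        simp [hnotin]
      · simp [h, List.mem_cons]

lemma flat_perm (n : Nat) (ws : List (List Char)) :
    ((PySem.Set.ofList (ws.map (fun w => w.take n))).flatMap (fun k => pvGrp n ws k)).Perm ws := by
  rw [List.perm_iff_count]
  intro a
  rw [List.count_flatMap]
  have h1 : ∀ k, (List.count a ∘ fun k => pvGrp n ws k) k =
      if a.take n = k then ws.count a else 0 := by
    intro k
    show (pvGrp n ws k).count a = _
    rw [pvGrp, count_filter_ite]
    by_cases h : a.take n = k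
    · simp [h]
    · have : (a.take n == k) = false := by simpa using h
      simp [this, h]
  rw [show List.map (List.count a ∘ fun k => pvGrp n ws k)
        (PySem.Set.ofList (ws.map (fun w => w.take n))) =
      List.map (fun k => if a.take n = k then ws.count a else 0)
        (PySem.Set.ofList (ws.map (fun w => w.take n))) from
    List.map_congr_left (fun k _ => h1 k)]
  rw [sum_ite_mem _ _ _ (PySem.Set.nodup_ofList _)]
  by_cases ha : a ∈ ws
  · rw [if_pos]
    rw [PySem.Set.mem_ofList]
    exact List.mem_map.mpr ⟨a, ha, rfl⟩
  · rw [List.count_eq_zero.mpr ha]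
    simp

lemma sg_filter (n : Nat) (ws : List (List Char)) (k : List Char) :
    pvSg k (pvGrp n ws k) = (pvGrp n ws k).filter (pvSurv ws n) := by
  have hmem : ∀ v ∈ pvGrp n ws k, v.take n = k ∧ pvCnt ws n v = (pvGrp n ws k).length := by
    intro v hv
    refine ⟨?_, cnt_of_mem_grp n ws k v hv⟩
    have := (List.mem_filter.mp hv).2
    simpa using this
  by_cases h1 : (pvGrp n ws k).length = 1
  · rw [pvSg, if_pos h1]
    symm
    rw [List.filter_eq_nil_iff]
    intro v hv
    have hc := (hmem v hv).2
    rw [h1] at hc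
    simp [pvSurv, hc]
  · rw [pvSg, if_neg h1]
    apply List.filter_congr
    intro v hv
    obtain ⟨hk, hc⟩ := hmem v hv
    have hg2 : 2 ≤ (pvGrp n ws k).length := by
      have : pvGrp n ws k ≠ [] := by intro h; rw [h] at hv; exact absurd hv (List.not_mem_nil)
      have := List.length_pos_iff.mpr this
      omega
    by_cases hv2 : v = k
    · have hb : (v == k) = true := by simpa using hv2
      have hshort : v.length ≤ n := (take_eq_iff_short n v k hk).mp hv2
      simp [hb, pvSurv]
      omega
    · have hb : (v == k) = false := by simpa using hv2
      have hlong : ¬ v.length ≤ n := fun hl => hv2 ((take_eq_iff_short n v k hk).mpr hl)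
      simp [hb, pvSurv, hc]
      exact ⟨by omega, by omega⟩

lemma filter_flatMap_comm (K : List (List Char)) (f : List Char → List (List Char))
    (p : List Char → Bool) :
    K.flatMap (fun k => (f k).filter p) = (K.flatMap f).filter p := by
  induction K with
  | nil => rfl
  | cons k t ih => rw [List.flatMap_cons, List.flatMap_cons, List.filter_append, ih]

lemma surv_perm (n : Nat) (ws : List (List Char)) :
    ((PySem.Set.ofList (ws.map (fun w => w.take n))).flatMap
        (fun k => pvSg k (pvGrp n ws k))).Perm (ws.filter (pvSurv ws n)) := by
  rw [show (fun k => pvSg k (pvGrp n ws k)) = fun k => (pvGrp n ws k).filter (pvSurv ws n) from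
    funext (fun k => sg_filter n ws k)]
  rw [filter_flatMap_comm]
  exact List.Perm.filter _ (flat_perm n ws)

lemma pvF_perm (ws1 ws2 : List (List Char)) (h : ws1.Perm ws2) (w : List Char) (s : Nat) :
    pvF ws1 w s = pvF ws2 w s := by
  generalize hm : w.length - s = m
  induction m generalizing s with
  | zero =>
      conv_lhs => rw [pvF]
      conv_rhs => rw [pvF]
      rw [if_pos (by omega), if_pos (by omega)]
  | succ m ih =>
      have hcnt : pvCnt ws1 s w = pvCnt ws2 s w := List.Perm.countP_eq _ h
      conv_lhs => rw [pvF]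
      conv_rhs => rw [pvF]
      rw [hcnt]
      by_cases hl : w.length ≤ s
      · rw [if_pos hl, if_pos hl]
      · rw [if_neg hl, if_neg hl]
        by_cases hc : pvCnt ws2 s w = 1
        · rw [if_pos hc, if_pos hc]
        · rw [if_neg hc, if_neg hc]
          exact ih (s + 1) (by omega)

lemma cnt_filter_surv (ws : List (List Char)) (n : Nat) (v : List Char)
    (hv : pvSurv ws n v = true) (s : Nat) (hs : n + 1 ≤ s) (hsl : s < v.length) :
    pvCnt (ws.filter (pvSurv ws n)) s v = pvCnt ws s v := by
  rw [pvCnt, List.countP_filter, pvCnt]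
  apply List.countP_congr
  intro x _
  simp only [Bool.and_eq_true, beq_iff_eq]
  constructor
  · intro hx; exact hx.1
  · intro hx
    refine ⟨hx, ?_⟩
    -- x shares v's s-prefix, hence v's n-prefix and length > n, so x survives too
    have hvs : (v.take s).length = s := by rw [List.length_take]; omega
    have hxl : s ≤ x.length := by
      have := congrArg List.length hx
      rw [List.length_take, hvs] at this
      omega
    have hxn : x.take n = v.take n := by
      have h1 : (x.take s).take n = (v.take s).take n := by rw [hx]
      simpa [List.take_take, Nat.min_eq_left (show n ≤ s by omega)] using h1
    have hcnt : pvCnt ws n x = pvCnt ws n v := by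
      rw [pvCnt, pvCnt, hxn]
    simp only [pvSurv, Bool.and_eq_true, decide_eq_true_eq] at hv ⊢
    exact ⟨by omega, by rw [hcnt]; exact hv.2⟩

lemma pvF_filter_surv (ws : List (List Char)) (n : Nat) (v : List Char)
    (hv : pvSurv ws n v = true) (s : Nat) (hs : n + 1 ≤ s) :
    pvF (ws.filter (pvSurv ws n)) v s = pvF ws v s := by
  generalize hm : v.length - s = m
  induction m generalizing s with
  | zero =>
      conv_lhs => rw [pvF]
      conv_rhs => rw [pvF]
      rw [if_pos (by omega), if_pos (by omega)]
  | succ m ih =>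
      have hsl : s < v.length := by omega
      have hcnt := cnt_filter_surv ws n v hv s hs hsl
      conv_lhs => rw [pvF]
      conv_rhs => rw [pvF]
      have hns : ¬ v.length ≤ s := by omega
      rw [hcnt, if_neg hns, if_neg hns]
      by_cases hc : pvCnt ws s v = 1
      · rw [if_pos hc, if_pos hc]
      · rw [if_neg hc, if_neg hc]
        exact ih (s + 1) (by omega) (by omega)

lemma sum_map_flatMap (K : List (List Char)) (f : List Char → List (List Char))
    (g : List Char → Nat) :
    ((K.flatMap f).map g).sum = (K.map (fun k => ((f k).map g).sum)).sum := by
  induction K with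
  | nil => rfl
  | cons k t ih => simp [List.flatMap_cons, ih]

lemma sum_map_add (K : List (List Char)) (f g : List Char → Nat) :
    (K.map (fun k => f k + g k)).sum = (K.map f).sum + (K.map g).sum := by
  induction K with
  | nil => rfl
  | cons k t ih => simp [ih]; omega

lemma grp_ne_nil (n : Nat) (ws : List (List Char)) (k : List Char)
    (hk : k ∈ PySem.Set.ofList (ws.map (fun w => w.take n))) : pvGrp n ws k ≠ [] := by
  rw [PySem.Set.mem_ofList] at hk
  obtain ⟨x, hx, hxk⟩ := List.mem_map.mp hk
  intro hnil
  have : x ∈ pvGrp n ws k := by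
    rw [pvGrp, List.mem_filter]
    exact ⟨hx, by simpa using hxk⟩
  rw [hnil] at this
  exact absurd this (List.not_mem_nil)

lemma key_split (n : Nat) (ws : List (List Char)) :
    (ws.map (fun w => pvF ws w n)).sum =
      ((PySem.Set.ofList (ws.map (fun w => w.take n))).map
          (fun k => pvAdd k (pvGrp n ws k))).sum +
        (((PySem.Set.ofList (ws.map (fun w => w.take n))).flatMap
            (fun k => pvSg k (pvGrp n ws k))).map (fun v => pvF ws v (n + 1))).sum := by
  have h1 := flat_perm n ws
  calc (ws.map (fun w => pvF ws w n)).sum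
      = (((PySem.Set.ofList (ws.map (fun w => w.take n))).flatMap
          (fun k => pvGrp n ws k)).map (fun w => pvF ws w n)).sum :=
        (List.Perm.sum_eq (List.Perm.map _ h1)).symm
    _ = ((PySem.Set.ofList (ws.map (fun w => w.take n))).map
          (fun k => ((pvGrp n ws k).map (fun w => pvF ws w n)).sum)).sum :=
        sum_map_flatMap _ _ _
    _ = ((PySem.Set.ofList (ws.map (fun w => w.take n))).map
          (fun k => pvAdd k (pvGrp n ws k) +
            ((pvSg k (pvGrp n ws k)).map (fun v => pvF ws v (n + 1))).sum)).sum :=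
        congrArg List.sum (List.map_congr_left (fun k hk => perKey n ws k (grp_ne_nil n ws k hk)))
    _ = _ := by
        rw [sum_map_add, sum_map_flatMap]

lemma pvMu_succ (ws : List (List Char)) (i : Nat) (h : ∀ w ∈ ws, i ≤ w.length) :
    pvMu ws (i + 1) + ws.length = pvMu ws i := by
  induction ws with
  | nil => rfl
  | cons w t ih =>
      have hw := h w (List.mem_cons_self ..)
      have ht := ih (fun x hx => h x (List.mem_cons_of_mem _ hx))
      simp only [pvMu, List.map_cons, List.sum_cons, List.length_cons] at *
      omega

lemma pvMu_filter_le (ws : List (List Char)) (p : List Char → Bool) (i : Nat) :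
    pvMu (ws.filter p) i ≤ pvMu ws i := by
  induction ws with
  | nil => exact Nat.le_refl _
  | cons w t ih =>
      rw [List.filter_cons]
      by_cases hp : p w
      · simp only [hp, if_true, pvMu, List.map_cons, List.sum_cons]
        exact Nat.add_le_add_left ih _
      · simp only [Bool.not_eq_true] at hp
        simp only [hp, Bool.false_eq_true, if_false, pvMu, List.map_cons, List.sum_cons]
        exact Nat.le_trans ih (Nat.le_add_left _ _)

lemma pvMu_perm (ws1 ws2 : List (List Char)) (h : ws1.Perm ws2) (i : Nat) :
    pvMu ws1 i = pvMu ws2 i := List.Perm.sum_eq (List.Perm.map _ h)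

lemma mainLoop (fuel : Nat) : ∀ (ws : List (List Char)) (i : Nat) (answer : Int),
    (∀ w ∈ ws, i ≤ w.length) → pvMu ws i ≤ fuel →
    solLoop fuel ws i answer = answer + (((ws.map (fun w => pvF ws w (i + 1))).sum : Nat) : Int) := by
  induction fuel with
  | zero =>
      intro ws i answer hinv hf
      cases ws with
      | nil => simp [solLoop]
      | cons w t =>
          exfalso
          have hw := hinv w (List.mem_cons_self ..)
          simp only [pvMu, List.map_cons, List.sum_cons] at hf
          omega
  | succ fuel ih =>
      intro ws i answer hinv hf
      cases ws with
      | nil => simp [solLoop]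
      | cons w t =>
          have hstep : solLoop (fuel + 1) (w :: t) i answer =
              solLoop fuel (aPass (aGroup i (w :: t)).items answer).2 (i + 1)
                (aPass (aGroup i (w :: t)).items answer).1 := rfl
          rw [hstep, group_items, aPass_spec]
          simp only [List.map_map, List.flatMap_map]
          have hcomp1 : ((fun (kv : List Char × List (List Char)) => pvAdd kv.1 kv.2) ∘
              fun k => (k, pvGrp (i + 1) (w :: t) k)) = fun k => pvAdd k (pvGrp (i + 1) (w :: t) k) := rfl
          have hcomp2 : (fun k => pvSg (k, pvGrp (i + 1) (w :: t) k).1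
              (k, pvGrp (i + 1) (w :: t) k).2) = fun k => pvSg k (pvGrp (i + 1) (w :: t) k) := rfl
          rw [hcomp1]
          set K := PySem.Set.ofList ((w :: t).map (fun w => w.take (i + 1))) with hK
          set ws' := K.flatMap (fun k => pvSg k (pvGrp (i + 1) (w :: t) k)) with hws'
          have hperm : ws'.Perm ((w :: t).filter (pvSurv (w :: t) (i + 1))) := surv_perm (i + 1) (w :: t)
          have hsurv : ∀ v ∈ ws', pvSurv (w :: t) (i + 1) v = true := by
            intro v hv
            exact (List.mem_filter.mp ((List.Perm.mem_iff hperm).mp hv)).2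
          have hinv' : ∀ v ∈ ws', i + 1 ≤ v.length := by
            intro v hv
            have := hsurv v hv
            simp only [pvSurv, Bool.and_eq_true, decide_eq_true_eq] at this
            omega
          have hf' : pvMu ws' (i + 1) ≤ fuel := by
            have e1 : pvMu ws' (i + 1) = pvMu ((w :: t).filter (pvSurv (w :: t) (i + 1))) (i + 1) :=
              pvMu_perm _ _ hperm _
            have e2 := pvMu_filter_le (w :: t) (pvSurv (w :: t) (i + 1)) (i + 1)
            have e3 := pvMu_succ (w :: t) i hinv
            simp only [List.length_cons] at e3
            omega
          rw [ih ws' (i + 1) _ hinv' hf']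
          have hinner : (ws'.map (fun v => pvF ws' v (i + 2))).sum =
              (ws'.map (fun v => pvF (w :: t) v (i + 2))).sum := by
            apply congrArg List.sum
            apply List.map_congr_left
            intro v hv
            rw [pvF_perm _ _ hperm v (i + 2)]
            exact pvF_filter_surv (w :: t) (i + 1) v (hsurv v hv) (i + 2) (by omega)
          rw [hinner]
          have hks := key_split (i + 1) (w :: t)
          rw [← hK] at hks
          rw [← hws'] at hks
          rw [hks]
          push_cast
          ring

-- ===== VERDICT (by name: the statement is the Claim_ definition above) =====
theorem solution_spec : Claim_equal_solution := by
  intro words _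
  unfold Spec_solution
  rw [alt_eq_sum]
  show solLoop _ _ 0 0 = _
  rw [mainLoop (aFuel (words.map String.toList)) (words.map String.toList) 0 0
      (by intro w _; exact Nat.zero_le _) (by simp [pvMu, aFuel])]
  simp
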